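-- pv_equiv track=rewrite | github.com/weiyixia/reidrisk | src/reidrisk/risk.py | set_attacker_known_fields_map
-- ===== SOURCE A (Python) =====
-- def set_attacker_known_fields_map(a_k_f_map):
--     '''
--     a_k_f_map: a list of dictionary of known fields for each attacker
--     this function checks if the dictionaries are consistent
--     i.e., the same fields in different dictionaries are mapped to the same field in the dataset
--     for example, if attacker 1 knows race, and attacker 2 also knows race,
--     the two race needs to to mapped to the same field in the dataset
--     the function returns the combined dictionary of the known fields from all the attackers
--     '''
--     if type(a_k_f_map) is dict:
--         return a_k_f_map
--     else:
--         a_k_f_map_combined = {}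
--         if a_k_f_map is None or len(a_k_f_map)==0:
--             raise ValueError("attacker known fields map is not specified")
--         else:
--             for item in a_k_f_map:
--                 for k,v in item.items():
--                     if k in a_k_f_map_combined:
--                         if a_k_f_map_combined[k] != v:
--                             raise ValueError("attacker known fields map is not consistent")
--                     else:
--                         a_k_f_map_combined[k] = v
--             return a_k_f_map_combined
-- ===== SOURCE B (Python) =====
-- def set_attacker_known_fields_map(a_k_f_map):
--     if type(a_k_f_map) is dict:
--         return a_k_f_map
--     if a_k_f_map is None or len(a_k_f_map) == 0:
--         raise ValueError("attacker known fields map is not specified")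
--     # phase 1: group every value seen for each key, in first-occurrence key order
--     groups = {}
--     for item in a_k_f_map:
--         for k, v in item.items():
--             groups.setdefault(k, []).append(v)
--     # phase 2: validate each group against its first value and build the result
--     combined = {}
--     for k, vs in groups.items():
--         first = vs[0]
--         if any(v != first for v in vs[1:]):
--             raise ValueError("attacker known fields map is not consistent")
--         combined[k] = first
--     return combined
-- ===== Notes on version B (the rewrite author's own statement) =====
-- stated objective: alternative
-- what changed: Replaces A's single interleaved check-while-inserting loop over one combined dict with a two-phase build-then-validate decomposition: first group all values per key into lists, then validate each group against its first value and emit the combined dict.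
import Mathlib
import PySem

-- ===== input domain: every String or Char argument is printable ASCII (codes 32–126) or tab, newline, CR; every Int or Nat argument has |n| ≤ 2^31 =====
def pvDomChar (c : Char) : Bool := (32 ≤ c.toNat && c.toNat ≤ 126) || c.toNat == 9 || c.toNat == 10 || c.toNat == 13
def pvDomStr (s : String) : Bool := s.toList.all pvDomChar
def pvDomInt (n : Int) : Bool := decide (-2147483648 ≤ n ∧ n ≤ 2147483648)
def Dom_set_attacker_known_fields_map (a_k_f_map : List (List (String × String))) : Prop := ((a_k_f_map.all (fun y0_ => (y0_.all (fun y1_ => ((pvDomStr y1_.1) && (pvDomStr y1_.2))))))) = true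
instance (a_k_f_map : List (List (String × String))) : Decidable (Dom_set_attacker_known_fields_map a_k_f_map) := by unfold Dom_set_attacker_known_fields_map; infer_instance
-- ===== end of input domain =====

-- B is an alternative decomposition of A: a first pass groups every value seen for each key,
-- a second pass validates each group against its first value and builds the combined dict.
-- Equivalence is about the RETURN value on inputs where the Python A returns (Pre_ below).

-- ===== PORT A =====
-- inner 'for k,v in item.items()' with the raise modelled as none
def pvLoopA : List (String × String) → PySem.Dict String String → Option (PySem.Dict String String)
  | [], d => some d
  | (k, v) :: rest, d =>
    match d.get? k with
    | some w => if w ≠ v then none else pvLoopA rest d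
    | none => pvLoopA rest (d.insert k v)

-- outer 'for item in a_k_f_map'
def pvOuterA : List (List (String × String)) → PySem.Dict String String → Option (PySem.Dict String String)
  | [], d => some d
  | item :: rest, d =>
    match pvLoopA item d with
    | none => none
    | some d' => pvOuterA rest d'

def set_attacker_known_fields_map (a_k_f_map : List (List (String × String))) : List (String × String) :=
  if a_k_f_map.length == 0 then []   -- Python raises ValueError here (outside Pre_)
  else
    match pvOuterA a_k_f_map PySem.Dict.empty with
    | some d => d.items
    | none => []                      -- Python raises ValueError here (outside Pre_)

-- ===== PORT B =====
-- phase 1: groups.setdefault(k, []).append(v) over the nested loops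
def pvGroupsB (a_k_f_map : List (List (String × String))) : PySem.Dict String (List String) :=
  a_k_f_map.foldl
    (fun g item => item.foldl (fun g p => g.modify p.1 [] (fun vs => vs ++ [p.2])) g)
    PySem.Dict.empty

-- phase 2: validate each group against its first value; the raise is modelled as none
def pvLoopB : List (String × List String) → PySem.Dict String String → Option (PySem.Dict String String)
  | [], c => some c
  | (k, vs) :: rest, c =>
    match vs with
    | [] => none                      -- unreachable: every group is nonempty
    | first :: tail =>
      if tail.any (fun v => v ≠ first) then none
      else pvLoopB rest (c.insert k first)

def set_attacker_known_fields_map_alt (a_k_f_map : List (List (String × String))) : List (String × String) :=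
  if a_k_f_map.length == 0 then []   -- Python raises ValueError here (outside Pre_)
  else
    match pvLoopB (pvGroupsB a_k_f_map).items PySem.Dict.empty with
    | some c => c.items
    | none => []                      -- Python raises ValueError here (outside Pre_)

-- ===== PRECONDITION & SPEC =====
-- Pre_ excludes exactly the inputs where A raises ValueError: the empty list, and
-- inconsistent maps (two pairs with the same key but different values).
def Pre_set_attacker_known_fields_map (a_k_f_map : List (List (String × String))) : Prop :=
  a_k_f_map ≠ [] ∧
  ∀ p ∈ a_k_f_map.flatten, ∀ q ∈ a_k_f_map.flatten, p.1 = q.1 → p.2 = q.2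
instance (a_k_f_map : List (List (String × String))) : Decidable (Pre_set_attacker_known_fields_map a_k_f_map) := by unfold Pre_set_attacker_known_fields_map; infer_instance

def pvWitness_set_attacker_known_fields_map : (List (List (String × String))) :=
  [[("race", "f1")], [("race", "f1"), ("age", "f2")]]

def Spec_set_attacker_known_fields_map (a_k_f_map : List (List (String × String))) (out : List (String × String)) : Prop := out = set_attacker_known_fields_map_alt a_k_f_map
instance (a_k_f_map : List (List (String × String))) (out : List (String × String)) : Decidable (Spec_set_attacker_known_fields_map a_k_f_map out) := by unfold Spec_set_attacker_known_fields_map; infer_instance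

-- ===== CLAIM (what is proved, stated in full; the proofs are below) =====
def Claim_equal_set_attacker_known_fields_map : Prop := ∀ (a_k_f_map : List (List (String × String))), Dom_set_attacker_known_fields_map a_k_f_map → Pre_set_attacker_known_fields_map a_k_f_map → Spec_set_attacker_known_fields_map a_k_f_map (set_attacker_known_fields_map a_k_f_map)

-- ===== LEMMAS AND PROOFS =====

-- first value recorded for a key, over the flattened pair sequence
def pvFirstVal? (ps : List (String × String)) (k : String) : Option String :=
  (ps.find? (fun p => p.1 == k)).map (·.2)

theorem pvFirstVal?_cons_ne {j k v : String} {rest : List (String × String)} (hj : j ≠ k) :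
    pvFirstVal? ((k, v) :: rest) j = pvFirstVal? rest j := by
  have hkj : (k == j) = false := by simp [Ne.symm hj]
  simp [pvFirstVal?, hkj]

theorem pvLoopA_append (xs ys : List (String × String)) (d : PySem.Dict String String) :
    pvLoopA (xs ++ ys) d = (pvLoopA xs d).bind (fun d' => pvLoopA ys d') := by
  induction xs generalizing d with
  | nil => simp [pvLoopA]
  | cons p rest ih =>
    obtain ⟨k, v⟩ := p
    simp only [List.cons_append, pvLoopA]
    cases h : d.get? k with
    | none => exact ih _
    | some w =>
      by_cases hw : w = v <;> simp [hw, ih]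

theorem pvOuterA_eq_flatten (m : List (List (String × String))) (d : PySem.Dict String String) :
    pvOuterA m d = pvLoopA m.flatten d := by
  induction m generalizing d with
  | nil => simp [pvOuterA, pvLoopA]
  | cons item rest ih =>
    simp only [pvOuterA, List.flatten_cons, pvLoopA_append]
    cases h : pvLoopA item d with
    | none => simp
    | some d' => simpa using ih d'

theorem pvLoopA_spec (ps : List (String × String)) (d : PySem.Dict String String)
    (hcd : ∀ p ∈ ps, ∀ w, d.get? p.1 = some w → w = p.2)
    (hps : ∀ p ∈ ps, ∀ q ∈ ps, p.1 = q.1 → p.2 = q.2)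
    (hnd : d.keys.Nodup) :
    ∃ d', pvLoopA ps d = some d' ∧
      d'.keys = PySem.Set.update d.keys (ps.map (·.1)) ∧
      ∀ k, d'.get? k = (d.get? k).or (pvFirstVal? ps k) := by
  induction ps generalizing d with
  | nil =>
    exact ⟨d, rfl, by simp [PySem.Set.update_nil], fun k => by simp [pvFirstVal?, List.find?]⟩
  | cons p rest ih =>
    obtain ⟨k, v⟩ := p
    have hrest : ∀ p ∈ rest, ∀ q ∈ rest, p.1 = q.1 → p.2 = q.2 := by
      intro p hp q hq
      exact hps p (List.mem_cons_of_mem _ hp) q (List.mem_cons_of_mem _ hq)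
    cases hg : d.get? k with
    | some w =>
      have hwv : w = v := hcd (k, v) List.mem_cons_self w hg
      have hcd' : ∀ p ∈ rest, ∀ w, d.get? p.1 = some w → w = p.2 := by
        intro p hp w hw
        exact hcd p (List.mem_cons_of_mem _ hp) w hw
      obtain ⟨d', h1, h2, h3⟩ := ih d hcd' hrest hnd
      refine ⟨d', by simp [pvLoopA, hg, hwv, h1], ?_, ?_⟩
      · have hk : k ∈ d.keys := by
          have := PySem.Dict.contains_eq_isSome_get? (d := d) (k := k)
          have hc : d.contains k = true := by rw [this, hg]; rfl
          exact (PySem.Dict.contains_iff_mem_keys _ _).mp hc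
        rw [h2]
        simp [PySem.Set.update_cons, PySem.Set.add_of_mem hk]
      · intro j
        rw [h3 j]
        by_cases hj : j = k
        · subst hj; simp [hg, hwv]
        · rw [pvFirstVal?_cons_ne hj]
    | none =>
      have hcd' : ∀ p ∈ rest, ∀ w, (d.insert k v).get? p.1 = some w → w = p.2 := by
        intro p hp w hw
        by_cases hpk : p.1 = k
        · have hw' : v = w := by
            rw [hpk] at hw
            simpa [PySem.Dict.get?_insert_self] using hw
          rw [← hw']
          exact hps (k, v) List.mem_cons_self p (List.mem_cons_of_mem _ hp) hpk.symm
        · rw [PySem.Dict.get?_insert_of_ne _ _ hpk] at hw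
          exact hcd p (List.mem_cons_of_mem _ hp) w hw
      have hnd' : (d.insert k v).keys.Nodup := PySem.Dict.nodup_keys_insert _ _ _ hnd
      obtain ⟨d', h1, h2, h3⟩ := ih (d.insert k v) hcd' hrest hnd'
      have hknm : k ∉ d.keys := by
        intro hk
        have hc := (PySem.Dict.contains_iff_mem_keys _ _).mpr hk
        rw [PySem.Dict.contains_eq_isSome_get?, hg] at hc
        simp at hc
      refine ⟨d', by simp [pvLoopA, hg, h1], ?_, ?_⟩
      · rw [h2, PySem.Dict.keys_insert_of_not_contains]
        · simp [PySem.Set.update_cons, PySem.Set.add_of_not_mem hknm]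
        · rw [PySem.Dict.contains_eq_isSome_get?, hg]; rfl
      · intro j
        rw [h3 j]
        by_cases hj : j = k
        · subst hj
          simp [PySem.Dict.get?_insert_self, hg, pvFirstVal?, List.find?]
        · rw [PySem.Dict.get?_insert_of_ne _ _ hj, pvFirstVal?_cons_ne hj]

theorem pvLoopB_spec (l : List (String × List String)) (c : PySem.Dict String String)
    (hfresh : ∀ kv ∈ l, c.contains kv.1 = false)
    (hnodup : (l.map (·.1)).Nodup)
    (hvals : ∀ kv ∈ l, kv.2 ≠ [] ∧ ∀ v ∈ kv.2, ∀ w ∈ kv.2, v = w) :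
    ∃ c', pvLoopB l c = some c' ∧
      c'.items = c.items ++ l.map (fun kv => (kv.1, kv.2.headD "")) := by
  induction l generalizing c with
  | nil => exact ⟨c, rfl, by simp⟩
  | cons kv rest ih =>
    obtain ⟨k, vs⟩ := kv
    obtain ⟨hne, hall⟩ := hvals (k, vs) List.mem_cons_self
    cases vs with
    | nil => exact absurd rfl hne
    | cons f tail =>
      have htail : tail.any (fun v => v ≠ f) = false := by
        simp only [List.any_eq_false]
        intro v hv
        simp [hall v (List.mem_cons_of_mem _ hv) f List.mem_cons_self]
      have hck : c.contains k = false := hfresh (k, f :: tail) List.mem_cons_self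
      have hfresh' : ∀ kv ∈ rest, (c.insert k f).contains kv.1 = false := by
        intro kv hkv
        rw [PySem.Dict.contains_insert]
        have h1 : c.contains kv.1 = false := hfresh kv (List.mem_cons_of_mem _ hkv)
        have h2 : kv.1 ≠ k := by
          intro h
          have : kv.1 ∈ rest.map (·.1) := List.mem_map_of_mem hkv
          rw [h] at this
          exact (List.nodup_cons.mp hnodup).1 this
        simp [h1, h2]
      obtain ⟨c', h1, h2⟩ := ih (c.insert k f) hfresh' (List.nodup_cons.mp hnodup).2
        (fun kv hkv => hvals kv (List.mem_cons_of_mem _ hkv))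
      refine ⟨c', by simp only [pvLoopB, htail, Bool.false_eq_true, if_false]; exact h1, ?_⟩
      rw [h2, PySem.Dict.items_insert_of_not_contains _ _ hck]
      simp

-- groups: nested fold = fold over the flattened pairs
theorem pvGroupsB_eq_flatten (m : List (List (String × String))) :
    pvGroupsB m =
      m.flatten.foldl (fun g p => g.modify p.1 [] (fun vs => vs ++ [p.2])) PySem.Dict.empty := by
  unfold pvGroupsB
  rw [List.foldl_flatten]

theorem pv_head?_filter_map (ps : List (String × String)) (k : String) :
    ((ps.filter (fun p => p.1 == k)).map (·.2)).head? = pvFirstVal? ps k := by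
  induction ps with
  | nil => simp [pvFirstVal?, List.find?]
  | cons p rest ih =>
    by_cases h : p.1 == k
    · simp [pvFirstVal?, List.filter, List.find?, h]
    · simp only [pvFirstVal?, List.filter, List.find?, h] at *
      exact ih

-- ===== VERDICT (by name: the statement is the Claim_ definition above) =====
theorem set_attacker_known_fields_map_spec : Claim_equal_set_attacker_known_fields_map := by
  intro m _ hpre
  obtain ⟨hne, hcons⟩ := hpre
  unfold Spec_set_attacker_known_fields_map
  -- A side
  obtain ⟨dA, hA1, hA2, hA3⟩ := pvLoopA_spec m.flatten PySem.Dict.empty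
    (by intro p _ w hw; simp [PySem.Dict.get?_empty] at hw) hcons (by simp [PySem.Dict.keys_empty])
  -- groups characterisation
  have hg := pvGroupsB_eq_flatten m
  have hgkeys : (pvGroupsB m).keys = PySem.Set.ofList (m.flatten.map (·.1)) := by
    rw [hg]
    have h := PySem.Dict.keys_foldl_modify_key (l := m.flatten) (key := fun p => p.1)
      (d0 := ([] : List String)) (f := fun _ p vs => vs ++ [p.2]) (d := PySem.Dict.empty)
    simpa only [PySem.Dict.keys_empty, PySem.Set.update_nil_left] using h
  have hgnodup : (pvGroupsB m).keys.Nodup := by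
    rw [hgkeys]; exact PySem.Set.nodup_ofList _
  have hgget : ∀ k, (pvGroupsB m).getD k [] = (m.flatten.filter (fun p => p.1 == k)).map (·.2) := by
    intro k
    rw [hg, PySem.Dict.getD_foldl_modify_append]
    simp only [PySem.Dict.getD_empty, List.nil_append]
  have hgitems : (pvGroupsB m).items =
      (PySem.Set.ofList (m.flatten.map (·.1))).map
        (fun k => (k, (m.flatten.filter (fun p => p.1 == k)).map (·.2))) := by
    rw [PySem.Dict.items_eq_map_keys _ hgnodup [], hgkeys]
    exact List.map_congr_left (fun k _ => by rw [hgget k])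
  -- B side loop
  obtain ⟨cB, hB1, hB2⟩ := pvLoopB_spec ((pvGroupsB m).items) PySem.Dict.empty
    (by intro kv _; simp [PySem.Dict.contains_empty])
    (by
      have h : (pvGroupsB m).items.map (·.1) = (pvGroupsB m).keys := rfl
      rw [h]; exact hgnodup)
    (by
      intro kv hkv
      rw [hgitems] at hkv
      obtain ⟨k, hk, hkeq⟩ := List.mem_map.mp hkv
      obtain ⟨p0, hp0, hp0k⟩ := List.mem_map.mp ((PySem.Set.mem_ofList _ _).mp hk)
      constructor
      · rw [← hkeq]
        simp only [ne_eq, List.map_eq_nil_iff, List.filter_eq_nil_iff, not_forall]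
        exact ⟨p0, hp0, by simp [hp0k]⟩
      · rw [← hkeq]
        intro v hv w hw
        simp only [List.mem_map, List.mem_filter] at hv hw
        obtain ⟨p, ⟨hpm, hpk⟩, hpv⟩ := hv
        obtain ⟨q, ⟨hqm, hqk⟩, hqv⟩ := hw
        rw [← hpv, ← hqv]
        exact hcons p hpm q hqm (by rw [eq_of_beq hpk, eq_of_beq hqk]))
  -- assemble
  have hmlen : (m.length == 0) = false := by
    cases m with
    | nil => exact absurd rfl hne
    | cons _ _ => rfl
  unfold set_attacker_known_fields_map set_attacker_known_fields_map_alt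
  rw [hmlen, pvOuterA_eq_flatten, hA1, hB1]
  simp only []
  rw [hB2]
  have hAkeys : dA.keys = PySem.Set.ofList (m.flatten.map (·.1)) := by
    rw [hA2]
    simp [PySem.Dict.keys_empty, PySem.Set.update_nil_left]
  have hAnodup : dA.keys.Nodup := by rw [hAkeys]; exact PySem.Set.nodup_ofList _
  rw [PySem.Dict.items_eq_map_keys dA hAnodup "", hAkeys, hgitems]
  have hemp : (PySem.Dict.empty : PySem.Dict String String).items = [] := rfl
  rw [hemp, List.nil_append, List.map_map]
  apply List.map_congr_left
  intro k hk
  simp only [Function.comp]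
  congr 1
  rw [PySem.Dict.getD_eq_get?_getD, hA3 k]
  simp only [PySem.Dict.get?_empty, Option.or, List.headD_eq_head?_getD, pv_head?_filter_map]
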